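-- pv_equiv track=rewrite | github.com/Bennyhwanggggg/Algorithm-and-Data-Structures-and-Coding-Challenges | Challenges/stringConversion.py | convert
-- ===== SOURCE A (Python) =====
-- def convert(s, t):
--   if len(s) != len(t):
--     return False
--
--   if s == t:
--     return True
--
--   dict_s = {}  # match char in s and t
--   unique_t = set()  # count unique letters in t
--
--   for i in range(len(s)):
--     if (s[i] in dict_s):
--       if dict_s[s[i]] != t[i]:
--         return False
--     else:
--       dict_s[s[i]] = t[i]
--     unique_t.add(t[i])
--
--   if len(dict_s) == 26:
--     return len(unique_t) < 26
--
--   return True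
-- ===== SOURCE B (Python) =====
-- def convert(s, t):
--     if len(s) != len(t):
--         return False
--     if s == t:
--         return True
--     pairs = sorted(set(zip(s, t)))
--     for p, q in zip(pairs, pairs[1:]):
--         if p[0] == q[0]:
--             return False
--     if len(set(s)) == 26:
--         return len(set(t)) < 26
--     return True
-- ===== Notes on version B (the rewrite author's own statement) =====
-- stated objective: alternative
-- what changed: Replaces A's hash-map strategy (build dict_s incrementally, early-exit on the first inconsistent position, count unique_t along the way) by sort-then-scan: deduplicate the (s[i], t[i]) pairs, sort them, and detect a conflict as two adjacent sorted pairs sharing their first component; the dict and the in-loop set disappear entirely.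
import Mathlib
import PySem

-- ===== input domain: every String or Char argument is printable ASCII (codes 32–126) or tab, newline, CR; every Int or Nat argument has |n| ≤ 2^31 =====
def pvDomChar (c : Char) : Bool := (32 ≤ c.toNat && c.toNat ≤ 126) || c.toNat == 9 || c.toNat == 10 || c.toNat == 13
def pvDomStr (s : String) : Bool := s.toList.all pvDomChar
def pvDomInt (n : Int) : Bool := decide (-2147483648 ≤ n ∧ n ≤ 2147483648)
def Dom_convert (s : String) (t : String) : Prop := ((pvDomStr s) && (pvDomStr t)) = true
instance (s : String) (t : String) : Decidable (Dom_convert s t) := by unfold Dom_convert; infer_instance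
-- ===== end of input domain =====

-- B replaces A's dict-with-early-exit pass by sort-then-scan: sort the distinct (s[i], t[i])
-- pairs and look for adjacent pairs with equal first components (objective: alternative, same result).

-- ===== PORT A =====
-- A's loop over i in range(len(s)): the pairs (s[i], t[i]) in order, keeping the first-seen
-- mapping dict_s and the set unique_t, returning False at the first inconsistent pair.
def convertLoopA (ps : List (Char × Char)) (d : PySem.Dict Char Char) (u : PySem.Set Char) : Bool :=
  match ps with
  | [] => if PySem.Dict.size d == 26 then decide (PySem.Set.len u < 26) else true
  | p :: rest =>
    match PySem.Dict.get? d p.1 with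
    | some v => if v != p.2 then false else convertLoopA rest d (PySem.Set.add u p.2)
    | none => convertLoopA rest (PySem.Dict.insert d p.1 p.2) (PySem.Set.add u p.2)

def convert (s : String) (t : String) : Bool :=
  if s.toList.length != t.toList.length then false
  else if s.toList == t.toList then true
  else convertLoopA (s.toList.zip t.toList) PySem.Dict.empty PySem.Set.empty

-- ===== PORT B =====
-- B: pairs = sorted(set(zip(s, t))); the 'for p, q in zip(pairs, pairs[1:])' scan for
-- adjacent pairs with equal first component, then the 26-distinct-letters check.
def adjScanB (l : List (Char × Char)) : Bool :=
  match l with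
  | p :: q :: rest => if p.1 == q.1 then false else adjScanB (q :: rest)
  | _ => true

def convert_alt (s : String) (t : String) : Bool :=
  if s.toList.length != t.toList.length then false
  else if s.toList == t.toList then true
  else
    let pairs := PySem.List.sorted2 (PySem.Set.ofList (s.toList.zip t.toList)) Prod.fst Prod.snd
    if adjScanB pairs = false then false
    else if PySem.Set.len (PySem.Set.ofList s.toList) == 26 then
      decide (PySem.Set.len (PySem.Set.ofList t.toList) < 26)
    else true

-- ===== PRECONDITION & SPEC =====
def Spec_convert (s : String) (t : String) (out : Bool) : Prop := out = convert_alt s t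
instance (s : String) (t : String) (out : Bool) : Decidable (Spec_convert s t out) := by unfold Spec_convert; infer_instance

-- ===== CLAIM (what is proved, stated in full; the proofs are below) =====
def Claim_equal_convert : Prop := ∀ (s : String) (t : String), Dom_convert s t → Spec_convert s t (convert s t)

-- ===== LEMMAS AND PROOFS =====

-- A's dict builder, with a general accumulator for the induction.
def mB (ps : List (Char × Char)) (d : PySem.Dict Char Char) : PySem.Dict Char Char :=
  ps.foldl (fun d p => PySem.Dict.insert d p.1 p.2) d

-- "d extended along ps never conflicts": each pair agrees with d, and ps is functional.
def Good (d : PySem.Dict Char Char) (ps : List (Char × Char)) : Prop :=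
  (∀ p ∈ ps, (PySem.Dict.get? d p.1).getD p.2 = p.2) ∧
  (∀ p ∈ ps, ∀ q ∈ ps, p.1 = q.1 → p.2 = q.2)

def good (d : PySem.Dict Char Char) (ps : List (Char × Char)) : Bool :=
  ps.all (fun p => (PySem.Dict.get? d p.1).getD p.2 == p.2) &&
  ps.all (fun p => ps.all (fun q => p.1 != q.1 || p.2 == q.2))

theorem good_iff (d : PySem.Dict Char Char) (ps : List (Char × Char)) :
    good d ps = true ↔ Good d ps := by
  simp [good, Good, List.all_eq_true, Decidable.or_iff_not_imp_left]

theorem good_not_of_ne (d : PySem.Dict Char Char) (p : Char × Char) (rest : List (Char × Char))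
    (v : Char) (h : PySem.Dict.get? d p.1 = some v) (hv : v ≠ p.2) : ¬ Good d (p :: rest) := by
  intro ⟨h1, _⟩
  have := h1 p (by simp)
  rw [h] at this
  exact hv this

theorem good_cons_some (d : PySem.Dict Char Char) (p : Char × Char) (rest : List (Char × Char))
    (h : PySem.Dict.get? d p.1 = some p.2) : Good d (p :: rest) ↔ Good d rest := by
  constructor
  · rintro ⟨h1, h2⟩
    exact ⟨fun q hq => h1 q (by simp [hq]),
           fun a ha b hb => h2 a (by simp [ha]) b (by simp [hb])⟩
  · rintro ⟨h1, h2⟩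
    constructor
    · intro q hq
      rcases List.mem_cons.mp hq with rfl | hq'
      · rw [h]; rfl
      · exact h1 q hq'
    · have key : ∀ q ∈ rest, q.1 = p.1 → q.2 = p.2 := by
        intro q hq hq1
        have := h1 q hq
        rw [← hq1] at h
        rw [h] at this
        exact this.symm
      intro a ha b hb hab
      rcases List.mem_cons.mp ha with rfl | ha' <;> rcases List.mem_cons.mp hb with rfl | hb'
      · rfl
      · exact (key b hb' hab.symm).symm
      · exact key a ha' hab
      · exact h2 a ha' b hb' hab

theorem good_cons_none (d : PySem.Dict Char Char) (p : Char × Char) (rest : List (Char × Char))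
    (h : PySem.Dict.get? d p.1 = none) : Good d (p :: rest) ↔ Good (PySem.Dict.insert d p.1 p.2) rest := by
  constructor
  · rintro ⟨h1, h2⟩
    constructor
    · intro q hq
      rw [PySem.Dict.get?_insert]
      by_cases hk : q.1 = p.1
      · simp only [hk, if_true]
        exact (h2 p (by simp) q (by simp [hq]) hk.symm)
      · rw [if_neg hk]; exact h1 q (by simp [hq])
    · exact fun a ha b hb => h2 a (by simp [ha]) b (by simp [hb])
  · rintro ⟨h1, h2⟩
    constructor
    · intro q hq
      rcases List.mem_cons.mp hq with rfl | hq'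
      · rw [h]; rfl
      · by_cases hk : q.1 = p.1
        · rw [hk, h]; rfl
        · have := h1 q hq'
          rw [PySem.Dict.get?_insert, if_neg hk] at this
          exact this
    · have key : ∀ q ∈ rest, q.1 = p.1 → q.2 = p.2 := by
        intro q hq hq1
        have := h1 q hq
        rw [PySem.Dict.get?_insert, if_pos hq1, Option.getD_some] at this
        exact this.symm
      intro a ha b hb hab
      rcases List.mem_cons.mp ha with rfl | ha' <;> rcases List.mem_cons.mp hb with rfl | hb'
      · rfl
      · exact (key b hb' hab.symm).symm
      · exact key a ha' hab
      · exact h2 a ha' b hb' hab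

theorem insert_eq_self_of_get? (d : PySem.Dict Char Char) (k v : Char)
    (hnd : d.keys.Nodup) (h : PySem.Dict.get? d k = some v) :
    PySem.Dict.insert d k v = d := by
  have hc : d.contains k = true := by
    rw [PySem.Dict.contains_eq_isSome_get?, h]; rfl
  apply PySem.Dict.ext
  rw [PySem.Dict.items_insert_of_contains d v hc]
  conv_rhs => rw [← List.map_id d.items]
  apply List.map_congr_left
  intro p hp
  by_cases hk : p.1 = k
  · have hg : PySem.Dict.get? d p.1 = some p.2 :=
      PySem.Dict.get?_of_mem_items d (by simpa using hp) hnd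
    rw [hk, h] at hg
    cases p with | mk a b => simp_all
  · simp [hk]

theorem loopA_eq (ps : List (Char × Char)) :
    ∀ (d : PySem.Dict Char Char) (u : PySem.Set Char), d.keys.Nodup →
    convertLoopA ps d u =
      if good d ps = true then
        (if PySem.Dict.size (mB ps d) == 26
         then decide (PySem.Set.len (PySem.Set.update u (ps.map Prod.snd)) < 26) else true)
      else false := by
  induction ps with
  | nil =>
    intro d u _
    rw [if_pos ((good_iff d []).mpr ⟨by simp, by simp⟩)]
    simp only [mB, List.foldl_nil, List.map_nil, PySem.Set.update_nil]
    rfl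
  | cons p rest ih =>
    intro d u hnd
    have hu : PySem.Set.update u ((p :: rest).map Prod.snd)
        = PySem.Set.update (PySem.Set.add u p.2) (rest.map Prod.snd) := by
      rw [List.map_cons, PySem.Set.update_cons]
    cases h : PySem.Dict.get? d p.1 with
    | none =>
      have hl : convertLoopA (p :: rest) d u
          = convertLoopA rest (PySem.Dict.insert d p.1 p.2) (PySem.Set.add u p.2) := by
        simp only [convertLoopA, h]
      rw [hl, ih _ _ (PySem.Dict.nodup_keys_insert d p.1 p.2 hnd)]
      have hg := good_cons_none d p rest h
      have hm : mB (p :: rest) d = mB rest (PySem.Dict.insert d p.1 p.2) := rfl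
      by_cases hgood : Good d (p :: rest)
      · rw [if_pos ((good_iff _ _).mpr (hg.mp hgood)), if_pos ((good_iff _ _).mpr hgood), hm, hu]
      · rw [if_neg (fun hx => hgood (hg.mpr ((good_iff _ _).mp hx))),
            if_neg (fun hx => hgood ((good_iff _ _).mp hx))]
    | some v =>
      by_cases hv : v = p.2
      · subst hv
        have hl : convertLoopA (p :: rest) d u
            = convertLoopA rest d (PySem.Set.add u p.2) := by
          simp only [convertLoopA, h, bne_self_eq_false, Bool.false_eq_true, if_false]
        rw [hl, ih _ _ hnd]
        have hg := good_cons_some d p rest h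
        have hm : mB (p :: rest) d = mB rest d := by
          rw [show mB (p :: rest) d = mB rest (PySem.Dict.insert d p.1 p.2) from rfl,
              insert_eq_self_of_get? d p.1 p.2 hnd h]
        by_cases hgood : Good d (p :: rest)
        · rw [if_pos ((good_iff _ _).mpr (hg.mp hgood)), if_pos ((good_iff _ _).mpr hgood), hm, hu]
        · rw [if_neg (fun hx => hgood (hg.mpr ((good_iff _ _).mp hx))),
              if_neg (fun hx => hgood ((good_iff _ _).mp hx))]
      · have hl : convertLoopA (p :: rest) d u = false := by
          simp only [convertLoopA, h]
          rw [if_pos (by simpa using hv)]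
        rw [hl, if_neg (fun hx => good_not_of_ne d p rest v h hv ((good_iff _ _).mp hx))]

-- ps is a consistent (functional) set of pairs
def Func (ps : List (Char × Char)) : Prop :=
  ∀ p ∈ ps, ∀ q ∈ ps, p.1 = q.1 → p.2 = q.2

theorem good_empty_iff (ps : List (Char × Char)) :
    Good PySem.Dict.empty ps ↔ Func ps := by
  constructor
  · exact fun h => h.2
  · intro h
    refine ⟨fun p _ => ?_, h⟩
    rw [PySem.Dict.get?_empty]; rfl

-- the number of keys A's dict ends with is the number of distinct first components
theorem size_mB (ps : List (Char × Char)) :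
    PySem.Dict.size (mB ps PySem.Dict.empty) = (PySem.Set.ofList (ps.map Prod.fst)).length := by
  have hkeys : (mB ps PySem.Dict.empty).keys = PySem.Set.ofList (ps.map Prod.fst) := by
    rw [show mB ps PySem.Dict.empty
          = List.foldl (fun d x => d.insert (Prod.fst x) ((fun (_ : PySem.Dict Char Char) (p : Char × Char) => p.2) d x)) PySem.Dict.empty ps from rfl,
        PySem.Dict.keys_foldl_insert_key]
    exact PySem.Set.update_empty _
  have : (mB ps PySem.Dict.empty).keys.length = (PySem.Set.ofList (ps.map Prod.fst)).length := by
    rw [hkeys]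
  simpa [PySem.Dict.size, PySem.Dict.keys] using this

-- generic: insertBy preserves Pairwise R when the comparator is compatible with R
theorem pairwise_insertBy {α : Type} (R : α → α → Prop) (before : α → α → Bool)
    (h1 : ∀ a b, before a b = true → R a b) (h2 : ∀ a b, before a b = false → R b a)
    (htrans : ∀ a b c, R a b → R b c → R a c)
    (x : α) (l : List α) (hl : l.Pairwise R) :
    (PySem.List.insertBy before x l).Pairwise R := by
  induction l with
  | nil => simp [PySem.List.insertBy]
  | cons y ys ih =>
    rw [List.pairwise_cons] at hl
    show (if before x y = true then x :: y :: ys else y :: PySem.List.insertBy before x ys).Pairwise R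
    by_cases hb : before x y = true
    · rw [if_pos hb]
      refine List.Pairwise.cons ?_ (List.Pairwise.cons hl.1 hl.2)
      intro w hw
      rcases List.mem_cons.mp hw with rfl | hw'
      · exact h1 _ _ hb
      · exact htrans _ _ _ (h1 _ _ hb) (hl.1 w hw')
    · rw [if_neg hb]
      refine List.Pairwise.cons ?_ (ih hl.2)
      intro w hw
      rcases (PySem.List.mem_insertBy before x w ys).mp hw with rfl | hw'
      · exact h2 _ _ (by simpa using hb)
      · exact hl.1 w hw'

-- sorted(set of pairs): first components are non-decreasing
theorem sorted2_pairwise_fst (xs : List (Char × Char)) :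
    (PySem.List.sorted2 xs Prod.fst Prod.snd false).Pairwise
      (fun a b : Char × Char => a.1 ≤ b.1) := by
  have hdef : PySem.List.sorted2 xs Prod.fst Prod.snd false
      = xs.foldl (fun acc x => PySem.List.insertBy
          (fun a b : Char × Char =>
            decide (a.1 < b.1) || (!decide (b.1 < a.1) && decide (a.2 < b.2))) x acc) [] := rfl
  rw [hdef]; clear hdef
  generalize hacc : ([] : List (Char × Char)) = acc
  have hp : acc.Pairwise (fun a b : Char × Char => a.1 ≤ b.1) := by rw [← hacc]; simp
  clear hacc
  induction xs generalizing acc with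
  | nil => simpa using hp
  | cons x rest ih =>
    simp only [List.foldl_cons]
    have hins : (PySem.List.insertBy
        (fun a b : Char × Char =>
          decide (a.1 < b.1) || (!decide (b.1 < a.1) && decide (a.2 < b.2))) x acc).Pairwise
        (fun a b : Char × Char => a.1 ≤ b.1) := by
      apply pairwise_insertBy
      · intro a b h
        by_cases hab : a.1 < b.1
        · exact le_of_lt hab
        · by_cases hba : b.1 < a.1
          · exfalso; simp [hab, hba] at h
          · exact le_of_not_gt hba
      · intro a b h
        by_cases hab : a.1 < b.1
        · exfalso; simp [hab] at h
        · exact le_of_not_gt hab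
      · intro a b c hab hbc; exact le_trans hab hbc
      · exact hp
    exact ih _ hins

-- the adjacent scan on a fst-sorted duplicate-free list detects exactly the conflicts
theorem adjScanB_iff (l : List (Char × Char))
    (hsort : l.Pairwise (fun a b : Char × Char => a.1 ≤ b.1)) (hnd : l.Nodup) :
    adjScanB l = true ↔ (∀ p ∈ l, ∀ q ∈ l, p.1 = q.1 → p.2 = q.2) := by
  induction l with
  | nil => simp [adjScanB]
  | cons p rest ih =>
    cases rest with
    | nil => simp [adjScanB]
    | cons q rest' =>
      rw [List.pairwise_cons] at hsort
      rw [List.nodup_cons] at hnd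
      have ihq := ih hsort.2 hnd.2
      constructor
      · intro h
        have hsplit : (p.1 == q.1) = false ∧ adjScanB (q :: rest') = true := by
          by_cases hb : (p.1 == q.1) = true
          · exfalso
            have : adjScanB (p :: q :: rest') = false := by
              show (if p.1 == q.1 then false else adjScanB (q :: rest')) = false
              rw [if_pos hb]
            rw [this] at h; exact Bool.false_ne_true h
          · have hb' : (p.1 == q.1) = false := by simpa using hb
            refine ⟨hb', ?_⟩
            have : adjScanB (p :: q :: rest') = adjScanB (q :: rest') := by
              show (if p.1 == q.1 then false else adjScanB (q :: rest')) = _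
              rw [hb']; simp
            rw [← this]; exact h
        have hne : p.1 ≠ q.1 := by simpa using hsplit.1
        have htail := ihq.mp hsplit.2
        have hkey : ∀ w ∈ q :: rest', p.1 ≠ w.1 := by
          intro w hw
          rcases List.mem_cons.mp hw with rfl | hw'
          · exact hne
          · intro hpw
            rw [List.pairwise_cons] at hsort
            have h1 : p.1 ≤ q.1 := hsort.1 q (by simp)
            have h2 : q.1 ≤ w.1 := hsort.2.1 w hw'
            exact hne (le_antisymm h1 (hpw ▸ h2))
        intro a ha b hb hab
        rcases List.mem_cons.mp ha with rfl | ha' <;> rcases List.mem_cons.mp hb with rfl | hb'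
        · rfl
        · exact absurd hab (hkey b hb')
        · exact absurd hab.symm (hkey a ha')
        · exact htail a ha' b hb' hab
      · intro h
        have hne : p ≠ q := fun he => hnd.1 (he ▸ List.mem_cons_self ..)
        have hb : (p.1 == q.1) = false := by
          by_cases hpq : p.1 = q.1
          · exfalso
            have h2 := h p (by simp) q (by simp) hpq
            exact hne (Prod.ext hpq h2)
          · simpa using hpq
        have : adjScanB (p :: q :: rest') = adjScanB (q :: rest') := by
          show (if p.1 == q.1 then false else adjScanB (q :: rest')) = _
          rw [hb]; simp
        rw [this]
        exact ihq.mpr (fun a ha b hb' => h a (by simp [ha]) b (by simp [hb']))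

theorem adjScanB_sorted_iff_Func (ps : List (Char × Char)) :
    adjScanB (PySem.List.sorted2 (PySem.Set.ofList ps) Prod.fst Prod.snd) = true ↔ Func ps := by
  have hperm := PySem.List.sorted2_perm (PySem.Set.ofList ps) Prod.fst Prod.snd false
  have hnd : (PySem.List.sorted2 (PySem.Set.ofList ps) Prod.fst Prod.snd false).Nodup :=
    hperm.nodup_iff.mpr (PySem.Set.nodup_ofList ps)
  rw [adjScanB_iff _ (sorted2_pairwise_fst _) hnd]
  unfold Func
  constructor
  · intro h a ha b hb
    exact h a (hperm.mem_iff.mpr ((PySem.Set.mem_ofList _ _).mpr ha))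
             b (hperm.mem_iff.mpr ((PySem.Set.mem_ofList _ _).mpr hb))
  · intro h a ha b hb
    exact h a ((PySem.Set.mem_ofList _ _).mp (hperm.mem_iff.mp ha))
             b ((PySem.Set.mem_ofList _ _).mp (hperm.mem_iff.mp hb))

theorem convert_eq (s t : String) : convert s t = convert_alt s t := by
  unfold convert convert_alt
  cases hb1 : (s.toList.length != t.toList.length) with
  | true => rfl
  | false =>
    simp only [Bool.false_eq_true, if_false]
    cases hb2 : (s.toList == t.toList) with
    | true => rfl
    | false =>
      simp only [Bool.false_eq_true, if_false]
      have hlen : s.toList.length = t.toList.length := by simpa using hb1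
      rw [loopA_eq (s.toList.zip t.toList) PySem.Dict.empty PySem.Set.empty
            PySem.Dict.nodup_keys_empty]
      rw [show PySem.Set.update PySem.Set.empty ((s.toList.zip t.toList).map Prod.snd)
            = PySem.Set.ofList ((s.toList.zip t.toList).map Prod.snd) from
          PySem.Set.update_empty _]
      rw [List.map_snd_zip (le_of_eq hlen.symm)]
      by_cases hfunc : Func (s.toList.zip t.toList)
      · rw [if_pos ((good_iff _ _).mpr ((good_empty_iff _).mpr hfunc))]
        have hscan := (adjScanB_sorted_iff_Func (s.toList.zip t.toList)).mpr hfunc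
        rw [hscan]
        simp only [Bool.true_eq_false, if_false]
        have hsize : (PySem.Dict.size (mB (s.toList.zip t.toList) PySem.Dict.empty) == 26)
            = (PySem.Set.len (PySem.Set.ofList s.toList) == 26) := by
          rw [size_mB, List.map_fst_zip (le_of_eq hlen)]
          by_cases h26 : (PySem.Set.ofList s.toList).length = 26
          · simp [PySem.Set.len, h26]
          · have hne : ((PySem.Set.ofList s.toList).length : Int) ≠ 26 := by omega
            simp [PySem.Set.len, h26, hne]
        rw [hsize]
      · rw [if_neg (fun hx => hfunc ((good_empty_iff _).mp ((good_iff _ _).mp hx)))]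
        have hscan : adjScanB (PySem.List.sorted2 (PySem.Set.ofList (s.toList.zip t.toList))
            Prod.fst Prod.snd) = false := by
          cases hsc : adjScanB (PySem.List.sorted2 (PySem.Set.ofList (s.toList.zip t.toList))
              Prod.fst Prod.snd) with
          | false => rfl
          | true => exact absurd ((adjScanB_sorted_iff_Func _).mp hsc) hfunc
        rw [hscan]
        simp

-- ===== VERDICT (by name: the statement is the Claim_ definition above) =====
theorem convert_spec : Claim_equal_convert := by
  intro s t _
  unfold Spec_convert
  exact convert_eq s t
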